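-- pv_equiv track=rewrite | github.com/EduardoAyalaP/python_uma | lectures/files/lec05/tools.py | validate_reg2
-- ===== SOURCE A (Python) =====
-- def validate_reg2(list_words):
--     """
--     Función para validar que cada elemento dentro de
--     `list_words` pertenezca a 'pos'
--     y ningún otro elemento se encuentre en 'neg'.
--
--     Parametro
--     ---------
--     list_words: lista de palabras a validar
--
--     Regresa: bool
--     """
--     labels = {'pos': ['afoot', 'catfoot', 'dogfoot', 'fanfoot', 'foody',
--                       'foolery', 'foolish', 'fooster', 'footage', 'foothot',
--                       'footle', 'footpad', 'footway', 'hotfoot', 'jawfoot',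
--                       'mafoo', 'nonfood', 'padfoot', 'prefool', 'sfoot',
--                       'unfool'],
--               'neg': ['Atlas', 'Aymoro', 'Iberic', 'Mahran', 'Ormazd',
--                       'Silipan', 'altared', 'chandoo', 'crenel', 'crooked',
--                       'fardo', 'folksy', 'forest', 'hebamic', 'idgah',
--                       'manlike', 'marly', 'palazzi', 'sixfold', 'tarrock',
--                       'unfold']}
--     all_pos = all(pos in list_words for pos in labels["pos"])
--     none_neg = all(neg not in list_words for neg in labels["neg"])
--     return all_pos and none_neg
-- ===== SOURCE B (Python) =====
-- POS = ['afoot', 'catfoot', 'dogfoot', 'fanfoot', 'foody',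
--        'foolery', 'foolish', 'fooster', 'footage', 'foothot',
--        'footle', 'footpad', 'footway', 'hotfoot', 'jawfoot',
--        'mafoo', 'nonfood', 'padfoot', 'prefool', 'sfoot',
--        'unfool']
-- NEG = ['Atlas', 'Aymoro', 'Iberic', 'Mahran', 'Ormazd',
--        'Silipan', 'altared', 'chandoo', 'crenel', 'crooked',
--        'fardo', 'folksy', 'forest', 'hebamic', 'idgah',
--        'manlike', 'marly', 'palazzi', 'sixfold', 'tarrock',
--        'unfold']
--
--
-- def validate_reg2(list_words):
--     """One pass over list_words: strike found words off a copy of POS,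
--     and flag any word from NEG; valid iff nothing is missing and no flag."""
--     missing = list(POS)
--     neg_found = False
--     for w in list_words:
--         if w in missing:
--             missing.remove(w)
--         if w in NEG:
--             neg_found = True
--     return not missing and not neg_found
-- ===== Notes on version B (the rewrite author's own statement) =====
-- stated objective: alternative
-- what changed: Instead of A's two label-driven scans (for each of the 42 label words, scan list_words), B makes a single pass over list_words, striking found words off a worklist copy of the pos labels and flagging any neg label, then checks the worklist is empty and no flag was raised.
import Mathlib
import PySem

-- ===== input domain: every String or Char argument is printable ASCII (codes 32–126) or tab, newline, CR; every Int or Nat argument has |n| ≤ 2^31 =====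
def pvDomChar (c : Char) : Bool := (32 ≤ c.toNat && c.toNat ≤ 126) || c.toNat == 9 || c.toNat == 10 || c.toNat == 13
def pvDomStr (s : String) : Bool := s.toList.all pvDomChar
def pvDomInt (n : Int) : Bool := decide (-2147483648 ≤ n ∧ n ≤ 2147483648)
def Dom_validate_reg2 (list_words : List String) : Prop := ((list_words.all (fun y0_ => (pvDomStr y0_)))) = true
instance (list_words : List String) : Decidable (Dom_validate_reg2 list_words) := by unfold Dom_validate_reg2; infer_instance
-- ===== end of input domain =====

-- B replaces A's two label-driven scans by one pass over list_words that strikes found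
-- words off a worklist copy of the pos labels and flags neg labels (objective: alternative).

-- ===== PORT A =====
def validate_reg2 (list_words : List String) : Bool :=
  let labels : PySem.Dict String (List String) :=
    PySem.Dict.ofList
      [("pos", ["afoot", "catfoot", "dogfoot", "fanfoot", "foody",
                "foolery", "foolish", "fooster", "footage", "foothot",
                "footle", "footpad", "footway", "hotfoot", "jawfoot",
                "mafoo", "nonfood", "padfoot", "prefool", "sfoot",
                "unfool"]),
       ("neg", ["Atlas", "Aymoro", "Iberic", "Mahran", "Ormazd",
                "Silipan", "altared", "chandoo", "crenel", "crooked",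
                "fardo", "folksy", "forest", "hebamic", "idgah",
                "manlike", "marly", "palazzi", "sixfold", "tarrock",
                "unfold"])]
  let all_pos := ((labels.get? "pos").getD []).all (fun pos => list_words.contains pos)
  let none_neg := ((labels.get? "neg").getD []).all (fun neg => !(list_words.contains neg))
  all_pos && none_neg

-- ===== PORT B =====
def pvPOS : List String :=
  ["afoot", "catfoot", "dogfoot", "fanfoot", "foody",
   "foolery", "foolish", "fooster", "footage", "foothot",
   "footle", "footpad", "footway", "hotfoot", "jawfoot",
   "mafoo", "nonfood", "padfoot", "prefool", "sfoot",
   "unfool"]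

def pvNEG : List String :=
  ["Atlas", "Aymoro", "Iberic", "Mahran", "Ormazd",
   "Silipan", "altared", "chandoo", "crenel", "crooked",
   "fardo", "folksy", "forest", "hebamic", "idgah",
   "manlike", "marly", "palazzi", "sixfold", "tarrock",
   "unfold"]

-- one iteration of B's loop body (state: remaining worklist of pos words, neg flag)
def pvAltStep (st : List String × Bool) (w : String) : List String × Bool :=
  let missing := if st.1.contains w then (PySem.List.remove? st.1 w).getD st.1 else st.1
  let neg_found := if pvNEG.contains w then true else st.2
  (missing, neg_found)

def validate_reg2_alt (list_words : List String) : Bool :=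
  let r := list_words.foldl pvAltStep (pvPOS, false)
  r.1.isEmpty && !r.2

-- ===== PRECONDITION & SPEC =====
def Spec_validate_reg2 (list_words : List String) (out : Bool) : Prop := out = validate_reg2_alt list_words
instance (list_words : List String) (out : Bool) : Decidable (Spec_validate_reg2 list_words out) := by unfold Spec_validate_reg2; infer_instance

-- ===== CLAIM (what is proved, stated in full; the proofs are below) =====
def Claim_equal_validate_reg2 : Prop := ∀ (list_words : List String), Dom_validate_reg2 list_words → Spec_validate_reg2 list_words (validate_reg2 list_words)

-- ===== LEMMAS AND PROOFS =====

-- one step of the loop, written without remove?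
theorem pvAltStep_eq (m : List String) (b : Bool) (w : String) :
    pvAltStep (m, b) w = ((if m.contains w then m.erase w else m), (pvNEG.contains w || b)) := by
  by_cases h : m.contains w
  · have hw : w ∈ m := by simpa [List.contains_iff_mem] using h
    simp only [pvAltStep, h, if_pos, PySem.List.remove?_eq_some_erase m w hw, Option.getD_some]
    cases pvNEG.contains w <;> cases b <;> simp
  · simp only [pvAltStep, h, Bool.false_eq_true, if_false]
    cases pvNEG.contains w <;> cases b <;> simp

-- loop invariant: the worklist ends as the pos words not seen, the flag as "some neg word seen"
theorem pv_foldl_char (ws : List String) : ∀ (m : List String) (b : Bool), m.Nodup →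
    ws.foldl pvAltStep (m, b)
      = (m.filter (fun p => !ws.contains p), b || ws.any (fun w => pvNEG.contains w)) := by
  induction ws with
  | nil => intro m b _; simp
  | cons w ws ih =>
    intro m b hm
    have hnd : (if m.contains w then m.erase w else m).Nodup := by
      split
      · exact hm.erase _
      · exact hm
    rw [List.foldl_cons, pvAltStep_eq, ih _ _ hnd]
    refine Prod.ext ?_ ?_
    · dsimp only
      by_cases h : m.contains w
      · rw [if_pos h, List.Nodup.erase_eq_filter hm, List.filter_filter]
        refine List.filter_congr (fun x _ => ?_)
        by_cases h1 : x = w <;> by_cases h2 : x ∈ ws <;>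
          simp [h1, h2]
      · rw [if_neg h]
        refine List.filter_congr (fun x hx => ?_)
        have hxw : ¬ x = w := fun e => h (by simp [← e, hx])
        by_cases h2 : x ∈ ws <;> simp [h2, hxw]
    · dsimp only
      simp only [List.any_cons]
      cases b <;> cases pvNEG.contains w <;> simp

theorem pv_main (ws : List String) : validate_reg2 ws = validate_reg2_alt ws := by
  have hA : validate_reg2 ws
      = (pvPOS.all (fun p => ws.contains p) && pvNEG.all (fun n => !ws.contains n)) := rfl
  have hB : validate_reg2_alt ws
      = ((ws.foldl pvAltStep (pvPOS, false)).1.isEmpty && !(ws.foldl pvAltStep (pvPOS, false)).2) := rfl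
  rw [hA, hB, pv_foldl_char ws pvPOS false (by decide)]
  rw [Bool.eq_iff_iff]
  simp only [Bool.and_eq_true, List.all_eq_true, List.isEmpty_iff, List.filter_eq_nil_iff,
    Bool.false_or, Bool.not_eq_true', List.any_eq_false, List.contains_iff_mem]
  constructor
  · rintro ⟨hpos, hneg⟩
    refine ⟨fun a ha hf => ?_, fun x hx hxn => ?_⟩
    · have ht : ws.contains a = true := List.contains_iff_mem.mpr (hpos a ha)
      rw [ht] at hf
      exact Bool.noConfusion hf
    · have ht : ws.contains x = true := List.contains_iff_mem.mpr hx
      rw [hneg x hxn] at ht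
      exact Bool.noConfusion ht
  · rintro ⟨hpos, hnone⟩
    constructor
    · intro p hp
      cases hcv : ws.contains p with
      | false => exact absurd hcv (hpos p hp)
      | true => exact List.contains_iff_mem.mp hcv
    · intro n hn
      cases hcv : ws.contains n with
      | false => rfl
      | true => exact absurd hn (hnone n (List.contains_iff_mem.mp hcv))

-- ===== VERDICT (by name: the statement is the Claim_ definition above) =====
theorem validate_reg2_spec : Claim_equal_validate_reg2 := by
  intro ws _
  exact pv_main ws
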